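-- pv_equiv track=rewrite | github.com/hackthebox/business-ctf-2024 | coding/[Easy] Dynamic Paths/htb/sol.py | find_min_path_sum
-- ===== SOURCE A (Python) =====
-- def find_min_path_sum(grid):
--     if not grid:
--         return 0, []
--
--     rows, cols = len(grid), len(grid[0])
--
--     dp = [[0] * cols for _ in range(rows)]
--     dp[0][0] = grid[0][0]
--
--     path = [[''] * cols for _ in range(rows)]
--     path[0][0] = str(grid[0][0])
--
--     for j in range(1, cols):
--         dp[0][j] = dp[0][j-1] + grid[0][j]
--         path[0][j] = path[0][j-1] + ' ' + str(grid[0][j])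
--
--     for i in range(1, rows):
--         dp[i][0] = dp[i-1][0] + grid[i][0]
--         path[i][0] = path[i-1][0] + ' ' + str(grid[i][0])
--
--     for i in range(1, rows):
--         for j in range(1, cols):
--             if dp[i-1][j] < dp[i][j-1]:
--                 dp[i][j] = dp[i-1][j] + grid[i][j]
--                 path[i][j] = path[i-1][j] + ' ' + str(grid[i][j])
--             else:
--                 dp[i][j] = dp[i][j-1] + grid[i][j]
--                 path[i][j] = path[i][j-1] + ' ' + str(grid[i][j])
--
--     min_path_sum = dp[rows-1][cols-1]
--     min_path = path[rows-1][cols-1]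
--
--     return min_path_sum, min_path
-- ===== SOURCE B (Python) =====
-- def find_min_path_sum(grid):
--     if not grid:
--         return 0, []
--     rows, cols = len(grid), len(grid[0])
--     # numeric DP only (no path strings carried through the table)
--     dp = [[0] * cols for _ in range(rows)]
--     dp[0][0] = grid[0][0]
--     for j in range(1, cols):
--         dp[0][j] = dp[0][j - 1] + grid[0][j]
--     for i in range(1, rows):
--         dp[i][0] = dp[i - 1][0] + grid[i][0]
--         row = dp[i]
--         prev = dp[i - 1]
--         for j in range(1, cols):
--             row[j] = min(prev[j], row[j - 1]) + grid[i][j]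
--     # reconstruct the single path by backtracking once
--     i, j = rows - 1, cols - 1
--     vals = []
--     while True:
--         vals.append(str(grid[i][j]))
--         if i == 0 and j == 0:
--             break
--         if i == 0:
--             j -= 1
--         elif j == 0:
--             i -= 1
--         elif dp[i - 1][j] < dp[i][j - 1]:
--             i -= 1
--         else:
--             j -= 1
--     vals.reverse()
--     return dp[rows - 1][cols - 1], ' '.join(vals)
-- ===== Notes on version B (the rewrite author's own statement) =====
-- stated objective: faster
-- what changed: B's DP table keeps only numeric sums and the single optimal path string is reconstructed by one backtracking pass, instead of A carrying a growing path string in every table cell.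
-- outside the precondition, e.g. on find_min_path_sum([]): A returns (0, []), B returns (0, [])
import Mathlib
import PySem

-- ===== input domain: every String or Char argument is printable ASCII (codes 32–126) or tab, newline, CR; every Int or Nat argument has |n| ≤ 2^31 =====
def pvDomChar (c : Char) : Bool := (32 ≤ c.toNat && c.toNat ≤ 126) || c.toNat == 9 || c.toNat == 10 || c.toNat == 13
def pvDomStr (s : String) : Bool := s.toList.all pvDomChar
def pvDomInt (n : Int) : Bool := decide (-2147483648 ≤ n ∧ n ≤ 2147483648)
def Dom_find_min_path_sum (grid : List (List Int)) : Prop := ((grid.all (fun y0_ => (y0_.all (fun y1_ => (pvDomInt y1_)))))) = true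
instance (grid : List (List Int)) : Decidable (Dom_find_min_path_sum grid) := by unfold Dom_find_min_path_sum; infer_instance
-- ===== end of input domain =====

-- B replaces A's table of per-cell path strings by a numeric-only DP plus one
-- backtracking pass that reconstructs the single optimal path string.

-- grid[i][j]; Pre_ keeps every access in range, so the defaults are never read
def pvGrid (grid : List (List Int)) (i j : Nat) : Int := (grid.getD i []).getD j 0

-- ===== PORT A =====
-- inner loop 'for j in range(1, cols)' of the first row: carries the left cell
def pvARow0 (grid : List (List Int)) : (Int × String) → List Nat → List (Int × String)
  | _, [] => []
  | left, j :: js =>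
    let c : Int × String :=
      (left.1 + pvGrid grid 0 j, left.2 ++ " " ++ PySem.Int.toStr (pvGrid grid 0 j))
    c :: pvARow0 grid c js

-- inner loop of a later row i: reads the previous row (above) and the left cell
def pvARow (grid : List (List Int)) (prev : List (Int × String)) (i : Nat) :
    (Int × String) → List Nat → List (Int × String)
  | _, [] => []
  | left, j :: js =>
    let a := prev.getD j (0, "")
    let c : Int × String :=
      if a.1 < left.1 then (a.1 + pvGrid grid i j, a.2 ++ " " ++ PySem.Int.toStr (pvGrid grid i j))
      else (left.1 + pvGrid grid i j, left.2 ++ " " ++ PySem.Int.toStr (pvGrid grid i j))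
    c :: pvARow grid prev i c js

-- the combined dp/path table of A, row by row
def pvARows (grid : List (List Int)) (cols : Nat) : Nat → List (Int × String)
  | 0 =>
    let c0 : Int × String := (pvGrid grid 0 0, PySem.Int.toStr (pvGrid grid 0 0))
    c0 :: pvARow0 grid c0 (List.range' 1 (cols - 1))
  | i + 1 =>
    let prev := pvARows grid cols i
    let p0 := prev.getD 0 (0, "")
    let f : Int × String :=
      (p0.1 + pvGrid grid (i + 1) 0, p0.2 ++ " " ++ PySem.Int.toStr (pvGrid grid (i + 1) 0))
    f :: pvARow grid prev (i + 1) f (List.range' 1 (cols - 1))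

-- Python's 'return 0, []' on the empty grid is not of type (int, str); Pre_ excludes it
def find_min_path_sum (grid : List (List Int)) : Int × String :=
  if grid = [] then (0, "")
  else
    let rows := grid.length
    let cols := (grid.headD []).length
    let cell := (pvARows grid cols (rows - 1)).getD (cols - 1) (0, "")
    (cell.1, cell.2)

-- ===== PORT B =====
-- numeric-only rows, same fill order as Source B
def pvBRow0 (grid : List (List Int)) : Int → List Nat → List Int
  | _, [] => []
  | left, j :: js =>
    let c := left + pvGrid grid 0 j
    c :: pvBRow0 grid c js

def pvBRow (grid : List (List Int)) (prev : List Int) (i : Nat) : Int → List Nat → List Int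
  | _, [] => []
  | left, j :: js =>
    let c := min (prev.getD j 0) left + pvGrid grid i j
    c :: pvBRow grid prev i c js

def pvBRows (grid : List (List Int)) (cols : Nat) : Nat → List Int
  | 0 => pvGrid grid 0 0 :: pvBRow0 grid (pvGrid grid 0 0) (List.range' 1 (cols - 1))
  | i + 1 =>
    let prev := pvBRows grid cols i
    let f := prev.getD 0 0 + pvGrid grid (i + 1) 0
    f :: pvBRow grid prev (i + 1) f (List.range' 1 (cols - 1))

-- the backtracking while-loop of Source B: collects str(grid[i][j]) end-to-start
def pvBT (grid dp : List (List Int)) (i j : Nat) : List String :=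
  let v := PySem.Int.toStr (pvGrid grid i j)
  if hi : i = 0 then
    if hj : j = 0 then [v]
    else v :: pvBT grid dp 0 (j - 1)
  else if hj : j = 0 then v :: pvBT grid dp (i - 1) 0
  else if (dp.getD (i - 1) []).getD j 0 < (dp.getD i []).getD (j - 1) 0 then
    v :: pvBT grid dp (i - 1) j
  else v :: pvBT grid dp i (j - 1)
termination_by (i, j)
decreasing_by
  · subst hi; exact Prod.Lex.right 0 (by omega)
  · exact Prod.Lex.left _ _ (by omega)
  · exact Prod.Lex.left _ _ (by omega)
  · exact Prod.Lex.right i (by omega)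

def find_min_path_sum_alt (grid : List (List Int)) : Int × String :=
  if grid = [] then (0, "")
  else
    let rows := grid.length
    let cols := (grid.headD []).length
    let dp := (List.range rows).map (pvBRows grid cols)
    let vals := (pvBT grid dp (rows - 1) (cols - 1)).reverse
    ((dp.getD (rows - 1) []).getD (cols - 1) 0, PySem.Str.join " " vals)

-- ===== PRECONDITION & SPEC =====
-- Pre_ excludes the empty grid, where A returns (0, []) whose path is a Python list
-- rather than a string, and grids whose first row is empty or longer than some other
-- row, where A raises IndexError.
def Pre_find_min_path_sum (grid : List (List Int)) : Prop :=
  grid ≠ [] ∧ 0 < (grid.headD []).length ∧ ∀ row ∈ grid, (grid.headD []).length ≤ row.length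
instance (grid : List (List Int)) : Decidable (Pre_find_min_path_sum grid) := by
  unfold Pre_find_min_path_sum; infer_instance

def pvWitness_find_min_path_sum : List (List Int) := [[1, 2, 3], [4, 5, 6], [7, 8, 9]]

def Spec_find_min_path_sum (grid : List (List Int)) (out : Int × String) : Prop :=
  out = find_min_path_sum_alt grid
instance (grid : List (List Int)) (out : Int × String) : Decidable (Spec_find_min_path_sum grid out) := by
  unfold Spec_find_min_path_sum; infer_instance

-- ===== CLAIM (what is proved, stated in full; the proofs are below) =====
def Claim_equal_find_min_path_sum : Prop := ∀ (grid : List (List Int)), Dom_find_min_path_sum grid → Pre_find_min_path_sum grid → Spec_find_min_path_sum grid (find_min_path_sum grid)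

-- ===== LEMMAS AND PROOFS =====

-- the common recurrence both programs implement, cell by cell
def pvCell (grid : List (List Int)) : Nat → Nat → Int × String
  | 0, 0 => (pvGrid grid 0 0, PySem.Int.toStr (pvGrid grid 0 0))
  | 0, j + 1 =>
    let l := pvCell grid 0 j
    (l.1 + pvGrid grid 0 (j + 1), l.2 ++ " " ++ PySem.Int.toStr (pvGrid grid 0 (j + 1)))
  | i + 1, 0 =>
    let u := pvCell grid i 0
    (u.1 + pvGrid grid (i + 1) 0, u.2 ++ " " ++ PySem.Int.toStr (pvGrid grid (i + 1) 0))
  | i + 1, j + 1 =>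
    let a := pvCell grid i (j + 1)
    let l := pvCell grid (i + 1) j
    if a.1 < l.1 then
      (a.1 + pvGrid grid (i + 1) (j + 1), a.2 ++ " " ++ PySem.Int.toStr (pvGrid grid (i + 1) (j + 1)))
    else
      (l.1 + pvGrid grid (i + 1) (j + 1), l.2 ++ " " ++ PySem.Int.toStr (pvGrid grid (i + 1) (j + 1)))
termination_by i j => (i, j)

theorem pvARow0_getD (grid : List (List Int)) :
    ∀ (k a n : Nat), n < k →
      (pvARow0 grid (pvCell grid 0 a) (List.range' (a + 1) k)).getD n (0, "") =
        pvCell grid 0 (a + 1 + n) := by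
  intro k
  induction k with
  | zero => intro a n h; omega
  | succ k ih =>
    intro a n h
    rw [List.range'_succ, pvARow0]
    have hc : (let c : Int × String :=
        ((pvCell grid 0 a).1 + pvGrid grid 0 (a + 1),
         (pvCell grid 0 a).2 ++ " " ++ PySem.Int.toStr (pvGrid grid 0 (a + 1)));
        c) = pvCell grid 0 (a + 1) := by
      rw [pvCell]
    cases n with
    | zero => simpa using hc
    | succ n =>
      simp only [List.getD_cons_succ]
      have := ih (a + 1) n (by omega)
      rw [show a + 1 + 1 = a + 1 + 1 from rfl] at this
      simp only [hc]
      rw [this]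
      congr 1
      omega

theorem pvARow_getD (grid : List (List Int)) (prev : List (Int × String)) (i cols : Nat)
    (hprev : ∀ j, j < cols → prev.getD j (0, "") = pvCell grid i j) :
    ∀ (k a n : Nat), n < k → a + 1 + k ≤ cols →
      (pvARow grid prev (i + 1) (pvCell grid (i + 1) a) (List.range' (a + 1) k)).getD n (0, "") =
        pvCell grid (i + 1) (a + 1 + n) := by
  intro k
  induction k with
  | zero => intro a n h _; omega
  | succ k ih =>
    intro a n h hk
    rw [List.range'_succ, pvARow]
    have habove : prev.getD (a + 1) (0, "") = pvCell grid i (a + 1) := hprev _ (by omega)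
    have hc : (if (prev.getD (a + 1) (0, "")).1 < (pvCell grid (i + 1) a).1 then
        ((prev.getD (a + 1) (0, "")).1 + pvGrid grid (i + 1) (a + 1),
         (prev.getD (a + 1) (0, "")).2 ++ " " ++ PySem.Int.toStr (pvGrid grid (i + 1) (a + 1)))
      else
        ((pvCell grid (i + 1) a).1 + pvGrid grid (i + 1) (a + 1),
         (pvCell grid (i + 1) a).2 ++ " " ++ PySem.Int.toStr (pvGrid grid (i + 1) (a + 1)))) =
        pvCell grid (i + 1) (a + 1) := by
      rw [habove, pvCell]
    cases n with
    | zero => simpa using hc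
    | succ n =>
      simp only [List.getD_cons_succ, hc]
      have := ih (a + 1) n (by omega) (by omega)
      rw [this]
      congr 1
      omega

theorem pvARows_getD (grid : List (List Int)) (cols : Nat) (hc : 1 ≤ cols) :
    ∀ i, ∀ j, j < cols → (pvARows grid cols i).getD j (0, "") = pvCell grid i j := by
  intro i
  induction i with
  | zero =>
    intro j hj
    rw [pvARows]
    cases j with
    | zero => simp [pvCell]
    | succ n =>
      simp only [List.getD_cons_succ]
      have h00 : pvCell grid 0 0 = (pvGrid grid 0 0, PySem.Int.toStr (pvGrid grid 0 0)) := by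
        rw [pvCell]
      have := pvARow0_getD grid (cols - 1) 0 n (by omega)
      rw [h00, show 0 + 1 + n = n + 1 from by omega] at this
      simpa using this
  | succ i ih =>
    intro j hj
    rw [pvARows]
    have hp0 : (pvARows grid cols i).getD 0 (0, "") = pvCell grid i 0 := ih 0 (by omega)
    have hf : ((pvARows grid cols i).getD 0 (0, "")).1 + pvGrid grid (i + 1) 0 = (pvCell grid (i + 1) 0).1 ∧
        ((pvARows grid cols i).getD 0 (0, "")).2 ++ " " ++ PySem.Int.toStr (pvGrid grid (i + 1) 0) = (pvCell grid (i + 1) 0).2 := by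
      rw [hp0]
      constructor <;> (conv_rhs => rw [pvCell])
    cases j with
    | zero =>
      simp only [List.getD_cons_zero]
      exact Prod.ext hf.1 hf.2
    | succ n =>
      simp only [List.getD_cons_succ]
      have hfeq : (((pvARows grid cols i).getD 0 (0, "")).1 + pvGrid grid (i + 1) 0,
          ((pvARows grid cols i).getD 0 (0, "")).2 ++ " " ++ PySem.Int.toStr (pvGrid grid (i + 1) 0)) =
          pvCell grid (i + 1) 0 := Prod.ext hf.1 hf.2
      rw [hfeq]
      have := pvARow_getD grid (pvARows grid cols i) i cols ih (cols - 1) 0 n (by omega) (by omega)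
      rw [show 0 + 1 + n = n + 1 from by omega] at this
      simpa using this

-- generic: getD through map with matching default
theorem pvGetD_map_fst (l : List (Int × String)) (n : Nat) :
    (l.map Prod.fst).getD n 0 = (l.getD n (0, "")).1 := by
  induction l generalizing n with
  | nil => simp
  | cons x xs ih =>
    cases n with
    | zero => simp
    | succ n =>
      simp only [List.map_cons, List.getD_cons_succ]
      exact ih n

theorem pvBRow0_eq (grid : List (List Int)) :
    ∀ (js : List Nat) (left : Int × String),
      (pvARow0 grid left js).map Prod.fst = pvBRow0 grid left.1 js := by
  intro js
  induction js with
  | nil => intro left; simp [pvARow0, pvBRow0]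
  | cons j js ih =>
    intro left
    rw [pvARow0, pvBRow0]
    simp only [List.map_cons]
    rw [ih]

theorem pvBRow_eq (grid : List (List Int)) (prev : List (Int × String)) (i : Nat) :
    ∀ (js : List Nat) (left : Int × String),
      (pvARow grid prev i left js).map Prod.fst = pvBRow grid (prev.map Prod.fst) i left.1 js := by
  intro js
  induction js with
  | nil => intro left; simp [pvARow, pvBRow]
  | cons j js ih =>
    intro left
    rw [pvARow, pvBRow]
    have hmin : (if (prev.getD j (0, "")).1 < left.1 then (prev.getD j (0, "")).1 + pvGrid grid i j
        else left.1 + pvGrid grid i j) = min ((prev.map Prod.fst).getD j 0) left.1 + pvGrid grid i j := by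
      rw [pvGetD_map_fst]
      rcases lt_or_ge (prev.getD j (0, "")).1 left.1 with h | h
      · rw [if_pos h, min_eq_left (le_of_lt h)]
      · rw [if_neg (not_lt.mpr h), min_eq_right h]
    have hfst : (if (prev.getD j (0, "")).1 < left.1 then
        ((prev.getD j (0, "")).1 + pvGrid grid i j,
         (prev.getD j (0, "")).2 ++ " " ++ PySem.Int.toStr (pvGrid grid i j))
      else (left.1 + pvGrid grid i j,
         left.2 ++ " " ++ PySem.Int.toStr (pvGrid grid i j))).1 =
        min ((prev.map Prod.fst).getD j 0) left.1 + pvGrid grid i j := by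
      rw [apply_ite Prod.fst]
      exact hmin
    simp only [List.map_cons]
    rw [ih, hfst]

theorem pvBRows_eq (grid : List (List Int)) (cols : Nat) :
    ∀ i, (pvARows grid cols i).map Prod.fst = pvBRows grid cols i := by
  intro i
  induction i with
  | zero =>
    rw [pvARows, pvBRows]
    simp only [List.map_cons]
    rw [pvBRow0_eq grid _ _]
  | succ i ih =>
    rw [pvARows, pvBRows]
    simp only [List.map_cons]
    have h0 : (pvBRows grid cols i).getD 0 0 = ((pvARows grid cols i).getD 0 (0, "")).1 := by
      rw [← ih, pvGetD_map_fst]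
    rw [pvBRow_eq, ih, h0]

theorem pvDp_getD (grid : List (List Int)) (cols rows i : Nat) (hi : i < rows) :
    (((List.range rows).map (pvBRows grid cols)).getD i []) = pvBRows grid cols i := by
  rw [List.getD_eq_getElem?_getD, List.getElem?_map, List.getElem?_range hi]
  rfl

theorem pvDp_cell (grid : List (List Int)) (cols rows i j : Nat) (hc : 1 ≤ cols)
    (hi : i < rows) (hj : j < cols) :
    (((List.range rows).map (pvBRows grid cols)).getD i []).getD j 0 = (pvCell grid i j).1 := by
  rw [pvDp_getD grid cols rows i hi, ← pvBRows_eq, pvGetD_map_fst, pvARows_getD grid cols hc i j hj]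

theorem pvJoin_append (xs : List (List Char)) (v : List Char) (h : xs ≠ []) :
    PySem.Chars.join [' '] (xs ++ [v]) = PySem.Chars.join [' '] xs ++ [' '] ++ v := by
  induction xs with
  | nil => simp at h
  | cons a t ih =>
    cases t with
    | nil => simp [PySem.Chars.join, List.intercalate]
    | cons b r =>
      have hih := ih (by simp)
      simp only [List.cons_append] at hih ⊢
      rw [PySem.Chars.join_cons_cons, hih, PySem.Chars.join_cons_cons]
      simp [List.append_assoc]

theorem pvBT_ne_nil (grid dp : List (List Int)) (i j : Nat) : pvBT grid dp i j ≠ [] := by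
  rw [pvBT]
  split_ifs <;> simp

-- the backtracked value list, reversed and joined, spells A's path string
theorem pvBT_join (grid : List (List Int)) (rows cols : Nat) (hc : 1 ≤ cols) :
    ∀ n i j, i + j ≤ n → i < rows → j < cols →
      PySem.Chars.join [' ']
          (((pvBT grid ((List.range rows).map (pvBRows grid cols)) i j).reverse).map String.toList) =
        ((pvCell grid i j).2).toList := by
  intro n
  induction n with
  | zero =>
    intro i j hn hi hj
    have hi0 : i = 0 := by omega
    have hj0 : j = 0 := by omega
    subst hi0; subst hj0
    rw [pvBT]
    simp [pvCell, PySem.Chars.join_singleton]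
  | succ n ih =>
    intro i j hn hi hj
    rw [pvBT]
    by_cases hi0 : i = 0
    · by_cases hj0 : j = 0
      · subst hi0; subst hj0
        simp [pvCell, PySem.Chars.join_singleton]
      · subst hi0
        rw [dif_pos rfl, dif_neg hj0]
        obtain ⟨j', rfl⟩ : ∃ j', j = j' + 1 := ⟨j - 1, by omega⟩
        simp only [Nat.add_sub_cancel, List.reverse_cons, List.map_append, List.map_cons,
          List.map_nil]
        rw [pvJoin_append _ _ (by simp [pvBT_ne_nil]), ih 0 j' (by omega) hi (by omega)]
        conv_rhs => rw [pvCell]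
        simp [String.toList_append]
    · by_cases hj0 : j = 0
      · subst hj0
        rw [dif_neg hi0, dif_pos rfl]
        obtain ⟨i', rfl⟩ : ∃ i', i = i' + 1 := ⟨i - 1, by omega⟩
        simp only [Nat.add_sub_cancel, List.reverse_cons, List.map_append, List.map_cons,
          List.map_nil]
        rw [pvJoin_append _ _ (by simp [pvBT_ne_nil]), ih i' 0 (by omega) (by omega) hj]
        conv_rhs => rw [pvCell]
        simp [String.toList_append]
      · obtain ⟨i', rfl⟩ : ∃ i', i = i' + 1 := ⟨i - 1, by omega⟩
        obtain ⟨j', rfl⟩ : ∃ j', j = j' + 1 := ⟨j - 1, by omega⟩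
        rw [dif_neg hi0, dif_neg hj0]
        simp only [Nat.add_sub_cancel]
        have hup := pvDp_cell grid cols rows i' (j' + 1) hc (by omega) hj
        have hleft := pvDp_cell grid cols rows (i' + 1) j' hc hi (by omega)
        rw [hup, hleft]
        conv_rhs => rw [pvCell]
        by_cases hlt : (pvCell grid i' (j' + 1)).1 < (pvCell grid (i' + 1) j').1
        · rw [if_pos hlt, if_pos hlt]
          simp only [List.reverse_cons, List.map_append, List.map_cons, List.map_nil]
          rw [pvJoin_append _ _ (by simp [pvBT_ne_nil]), ih i' (j' + 1) (by omega) (by omega) hj]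
          simp [String.toList_append]
        · rw [if_neg hlt, if_neg hlt]
          simp only [List.reverse_cons, List.map_append, List.map_cons, List.map_nil]
          rw [pvJoin_append _ _ (by simp [pvBT_ne_nil]), ih (i' + 1) j' (by omega) hi (by omega)]
          simp [String.toList_append]

theorem pvStr_ext (x y : String) (h : x.toList = y.toList) : x = y := by
  have := congrArg String.ofList h
  simpa using this

-- ===== VERDICT (by name: the statement is the Claim_ definition above) =====
theorem find_min_path_sum_spec : Claim_equal_find_min_path_sum := by
  intro grid _ hpre
  obtain ⟨hne, hc, -⟩ := hpre
  unfold Spec_find_min_path_sum find_min_path_sum find_min_path_sum_alt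
  rw [if_neg hne, if_neg hne]
  dsimp only
  have hrows : 1 ≤ grid.length := by
    cases grid with
    | nil => exact absurd rfl hne
    | cons a l => simp
  set cols := (grid.headD []).length with hcols
  set rows := grid.length with hrw
  have hcell := pvARows_getD grid cols hc (rows - 1) (cols - 1) (by omega)
  have hfst := pvDp_cell grid cols rows (rows - 1) (cols - 1) hc (by omega) (by omega)
  have hsnd := pvBT_join grid rows cols hc ((rows - 1) + (cols - 1)) (rows - 1) (cols - 1)
    (le_refl _) (by omega) (by omega)
  rw [hcell]
  refine Prod.ext ?_ ?_
  · exact hfst.symm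
  · apply pvStr_ext
    simp only [PySem.Str.join, String.toList_ofList]
    rw [show (" " : String).toList = [' '] from rfl, hsnd]
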